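-- pv_equiv track=rewrite | github.com/ppoilbarbe/PBoule | python/pboule/poules.py | repartition_poules
-- ===== SOURCE A (Python) =====
-- def repartition_poules(n_total: int, base: int = 4) -> list[int]:
--     """
--     Répartit n_total équipes en poules de taille `base` ou `base+1`.
--
--     Priorités (de haut en bas) :
--       1. Distribution uniforme en poules de base si N divisible par base.
--       2. Distribution uniforme en poules de (base+1) si N divisible par base+1.
--       3. Distribution mixte : poules de base en tête, surplus de (base+1) en fin.
--     """
--     if n_total % base == 0:
--         return [base] * (n_total // base)
--     if n_total % (base + 1) == 0:
--         return [base + 1] * (n_total // (base + 1))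
--     for n_poules in range(max(1, n_total // (base + 1)), n_total + 1):
--         x = n_total - n_poules * base
--         y = n_poules - x
--         if 0 <= x <= n_poules and y >= 0:
--             return [base] * y + [base + 1] * x
--     n_poules = max(1, n_total // base)
--     reste = n_total - n_poules * base
--     return [base] * n_poules + ([reste] if reste else [])
-- ===== SOURCE B (Python) =====
-- def repartition_poules(n_total: int, base: int = 4) -> list[int]:
--     if n_total % base == 0:
--         return [base] * (n_total // base)
--     if n_total % (base + 1) == 0:
--         return [base + 1] * (n_total // (base + 1))
--     # Smallest feasible pool count is ceil(n_total / (base + 1)); check it directly.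
--     n_poules = -(-n_total // (base + 1))
--     x = n_total - n_poules * base
--     y = n_poules - x
--     if 0 <= x <= n_poules and y >= 0:
--         return [base] * y + [base + 1] * x
--     n_poules = max(1, n_total // base)
--     reste = n_total - n_poules * base
--     return [base] * n_poules + ([reste] if reste else [])
-- ===== Notes on version B (the rewrite author's own statement) =====
-- stated objective: faster
-- what changed: The linear search over range(max(1, n_total//(base+1)), n_total+1) for a feasible pool count is replaced by checking the single closed-form candidate ceil(n_total/(base+1)), which is the smallest feasible count whenever one exists; guards and fallback are unchanged. Pre_ excludes only base = 0, where A's first statement raises ZeroDivisionError.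
import Mathlib
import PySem

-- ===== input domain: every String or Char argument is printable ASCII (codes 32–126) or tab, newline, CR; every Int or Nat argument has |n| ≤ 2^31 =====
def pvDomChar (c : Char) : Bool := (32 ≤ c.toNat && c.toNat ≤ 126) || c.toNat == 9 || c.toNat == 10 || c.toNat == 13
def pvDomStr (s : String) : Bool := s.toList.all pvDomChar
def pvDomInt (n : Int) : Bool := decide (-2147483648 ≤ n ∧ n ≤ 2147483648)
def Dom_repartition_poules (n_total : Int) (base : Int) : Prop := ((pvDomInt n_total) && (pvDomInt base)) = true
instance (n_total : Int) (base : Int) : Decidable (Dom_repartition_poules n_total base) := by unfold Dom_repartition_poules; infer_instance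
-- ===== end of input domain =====

-- B replaces A's linear search for the pool count by one closed-form candidate check (same guards, same fallback); objective: faster search step.


-- ===== PORT A =====
-- the `for n_poules in range(...)` loop: first hit returns `some result`, exhaustion returns `none`
def repLoopA (n_total base : Int) : List Int → Option (List Int)
  | [] => none
  | n_poules :: rest =>
      let x := n_total - n_poules * base
      let y := n_poules - x
      if 0 ≤ x ∧ x ≤ n_poules ∧ 0 ≤ y then
        some (PySem.List.pyRepeat [base] y ++ PySem.List.pyRepeat [base + 1] x)
      else repLoopA n_total base rest

def repartition_poules (n_total : Int) (base : Int) : List Int :=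
  if PySem.Int.mod n_total base = 0 then
    PySem.List.pyRepeat [base] (PySem.Int.floordiv n_total base)
  else if PySem.Int.mod n_total (base + 1) = 0 then
    PySem.List.pyRepeat [base + 1] (PySem.Int.floordiv n_total (base + 1))
  else
    match repLoopA n_total base
        (PySem.List.pyRange (max 1 (PySem.Int.floordiv n_total (base + 1))) (n_total + 1)) with
    | some l => l
    | none =>
        let n_poules := max 1 (PySem.Int.floordiv n_total base)
        let reste := n_total - n_poules * base
        PySem.List.pyRepeat [base] n_poules ++ (if reste ≠ 0 then [reste] else [])

-- ===== PORT B =====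
def repartition_poules_alt (n_total : Int) (base : Int) : List Int :=
  if PySem.Int.mod n_total base = 0 then
    PySem.List.pyRepeat [base] (PySem.Int.floordiv n_total base)
  else if PySem.Int.mod n_total (base + 1) = 0 then
    PySem.List.pyRepeat [base + 1] (PySem.Int.floordiv n_total (base + 1))
  else
    let n_poules := -(PySem.Int.floordiv (-n_total) (base + 1))
    let x := n_total - n_poules * base
    let y := n_poules - x
    if 0 ≤ x ∧ x ≤ n_poules ∧ 0 ≤ y then
      PySem.List.pyRepeat [base] y ++ PySem.List.pyRepeat [base + 1] x
    else
      let n_poules' := max 1 (PySem.Int.floordiv n_total base)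
      let reste := n_total - n_poules' * base
      PySem.List.pyRepeat [base] n_poules' ++ (if reste ≠ 0 then [reste] else [])

-- ===== PRECONDITION & SPEC =====
-- Pre_ excludes exactly base = 0, where A's first statement `n_total % base` raises ZeroDivisionError.
def Pre_repartition_poules (n_total : Int) (base : Int) : Prop := base ≠ 0
instance (n_total : Int) (base : Int) : Decidable (Pre_repartition_poules n_total base) := by unfold Pre_repartition_poules; infer_instance
def pvWitness_repartition_poules : Int × Int := (7, 4)

def Spec_repartition_poules (n_total : Int) (base : Int) (out : List Int) : Prop := out = repartition_poules_alt n_total base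
instance (n_total : Int) (base : Int) (out : List Int) : Decidable (Spec_repartition_poules n_total base out) := by unfold Spec_repartition_poules; infer_instance

-- ===== CLAIM (what is proved, stated in full; the proofs are below) =====
def Claim_equal_repartition_poules : Prop := ∀ (n_total : Int) (base : Int), Dom_repartition_poules n_total base → Pre_repartition_poules n_total base → Spec_repartition_poules n_total base (repartition_poules n_total base)

-- ===== LEMMAS AND PROOFS =====

-- The loop body's output at pool count n.
def loopOut (t b n : Int) : List Int :=
  PySem.List.pyRepeat [b] (n - (t - n * b)) ++ PySem.List.pyRepeat [b + 1] (t - n * b)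

-- First hit of an interval predicate over a consecutive range.
theorem repLoopA_range (t b L U : Int)
    (hP : ∀ n : Int, (0 ≤ t - n * b ∧ t - n * b ≤ n ∧ 0 ≤ n - (t - n * b)) ↔ (L ≤ n ∧ n ≤ U)) :
    ∀ (bnd a : Int),
      repLoopA t b (PySem.List.pyRange a bnd) =
        if max a L ≤ U ∧ max a L < bnd then some (loopOut t b (max a L)) else none := by
  intro bnd
  suffices h : ∀ (k : Nat) (a : Int), (bnd - a).toNat = k →
      repLoopA t b (PySem.List.pyRange a bnd) =
        if max a L ≤ U ∧ max a L < bnd then some (loopOut t b (max a L)) else none by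
    intro a; exact h _ a rfl
  intro k
  induction k with
  | zero =>
      intro a hk
      have hba : bnd ≤ a := by omega
      rw [PySem.List.pyRange_one_eq_nil hba]
      simp only [repLoopA]
      have hnc : ¬ (max a L ≤ U ∧ max a L < bnd) := by omega
      rw [if_neg hnc]
  | succ k ih =>
      intro a hk
      have hab : a < bnd := by omega
      rw [PySem.List.pyRange_one_cons hab]
      simp only [repLoopA]
      by_cases hPa : 0 ≤ t - a * b ∧ t - a * b ≤ a ∧ 0 ≤ a - (t - a * b)
      · have hla : L ≤ a ∧ a ≤ U := (hP a).mp hPa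
        have hmax : max a L = a := by omega
        have hcond : max a L ≤ U ∧ max a L < bnd := by omega
        rw [if_pos hPa, if_pos hcond, hmax]
        simp [loopOut]
      · have hla : ¬ (L ≤ a ∧ a ≤ U) := fun h => hPa ((hP a).mpr h)
        rw [if_neg hPa]
        rw [ih (a + 1) (by omega)]
        by_cases hLa : a < L
        · have : max a L = max (a + 1) L := by omega
          rw [this]
        · have hU : U < a := by omega
          have h1 : ¬ (max a L ≤ U ∧ max a L < bnd) := by omega
          have h2 : ¬ (max (a + 1) L ≤ U ∧ max (a + 1) L < bnd) := by omega
          rw [if_neg h1, if_neg h2]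

-- Bracket facts for the closed-form bounds.
theorem le_bound_mul_le {t c n : Int} (hc : 0 < c) :
    (t ≤ n * c ↔ -(PySem.Int.floordiv (-t) c) ≤ n) := by
  constructor
  · intro h
    have : -n ≤ PySem.Int.floordiv (-t) c := (PySem.Int.le_floordiv_iff_mul_le hc).mpr (by nlinarith)
    omega
  · intro h
    have : (-n) * c ≤ -t := (PySem.Int.le_floordiv_iff_mul_le hc).mp (by omega)
    nlinarith

theorem mul_le_bound_le {t c n : Int} (hc : 0 < c) :
    (n * c ≤ t ↔ n ≤ PySem.Int.floordiv t c) :=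
  (PySem.Int.le_floordiv_iff_mul_le hc).symm

-- ===== VERDICT (by name: the statement is the Claim_ definition above) =====
theorem repartition_poules_spec : Claim_equal_repartition_poules := by
  intro t b _ hb
  unfold Spec_repartition_poules repartition_poules repartition_poules_alt
  by_cases h1 : PySem.Int.mod t b = 0
  · simp [h1]
  · rw [if_neg h1, if_neg h1]
    by_cases h2 : PySem.Int.mod t (b + 1) = 0
    · simp [h2]
    · rw [if_neg h2, if_neg h2]
      -- b = -1 is impossible: then mod t b = t % (-1) = 0, contradicting h1
      have hbne1 : b ≠ -1 := by
        intro hbe; apply h1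
        rw [hbe, PySem.Int.mod_eq_zero_iff_dvd]
        exact ⟨-t, by ring⟩
      have hsplit : 0 < b ∨ b < -1 := by
        rcases lt_trichotomy b 0 with h | h | h
        · right; omega
        · exact absurd h hb
        · left; exact h
      set lo0 := max 1 (PySem.Int.floordiv t (b + 1)) with hlo0
      set n0 := -(PySem.Int.floordiv (-t) (b + 1)) with hn0
      rcases hsplit with hpos | hneg
      · -- b ≥ 1, c = b + 1 ≥ 2 > 0
        have hc : (0:Int) < b + 1 := by omega
        have hP : ∀ n : Int, (0 ≤ t - n * b ∧ t - n * b ≤ n ∧ 0 ≤ n - (t - n * b)) ↔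
            (n0 ≤ n ∧ n ≤ PySem.Int.floordiv t b) := by
          intro n
          have e1 := (le_bound_mul_le (t := t) (n := n) hc)
          have e2 := (mul_le_bound_le (t := t) (n := n) hpos)
          rw [hn0]
          constructor
          · intro ⟨ha, hb', _⟩
            refine ⟨e1.mp (by nlinarith), e2.mp (by nlinarith)⟩
          · intro ⟨hl, hr⟩
            have := e1.mpr hl
            have := e2.mpr hr
            refine ⟨by nlinarith, by nlinarith, by nlinarith⟩
        have hloop := repLoopA_range t b _ _ hP (t + 1) lo0
        rw [hloop]
        set U := PySem.Int.floordiv t b with hU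
        by_cases hBc : 0 ≤ t - n0 * b ∧ t - n0 * b ≤ n0 ∧ 0 ≤ n0 - (t - n0 * b)
        · -- B fires; show A's condition holds and max lo0 n0 = n0
          have hfeas : n0 ≤ n0 ∧ n0 ≤ U := (hP n0).mp hBc
          have hx0 := hBc.1
          have hxn := hBc.2.1
          -- n0 ≥ 1 : n0 ≥ 0 from 0 ≤ x ≤ n0; n0 = 0 would give t = 0 hence mod t b = 0
          have hn0pos : 1 ≤ n0 := by
            rcases lt_or_ge n0 1 with hlt | hge
            · have hn0z : n0 = 0 := by omega
              have ht0 : t = 0 := by rw [hn0z] at hx0 hxn; omega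
              exfalso; apply h1
              rw [ht0, PySem.Int.mod_eq_zero_iff_dvd]; exact ⟨0, by ring⟩
            · exact hge
          -- floor ≤ ceil : fdiv t (b+1) ≤ n0
          have hfl : PySem.Int.floordiv t (b + 1) * (b + 1) ≤ t :=
            (PySem.Int.le_floordiv_iff_mul_le hc).mp le_rfl
          have hfl2 : PySem.Int.floordiv (-t) (b + 1) * (b + 1) ≤ -t :=
            (PySem.Int.le_floordiv_iff_mul_le hc).mp le_rfl
          have hfloorle : PySem.Int.floordiv t (b + 1) ≤ n0 := by
            rw [hn0]; nlinarith
          have hlo0le : lo0 ≤ n0 := by rw [hlo0]; omega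
          have hUb : U * b ≤ t := (PySem.Int.le_floordiv_iff_mul_le hpos).mp le_rfl
          have hUt : n0 ≤ t := by nlinarith [hfeas.2]
          have hAcond : max lo0 n0 ≤ U ∧ max lo0 n0 < t + 1 := by
            constructor
            · have : max lo0 n0 = n0 := by omega
              rw [this]; exact hfeas.2
            · omega
          rw [if_pos hAcond]
          have hmx : max lo0 n0 = n0 := by omega
          rw [if_pos hBc, hmx]
          simp only [loopOut]
        · -- B does not fire: show A's loop also misses
          have hAcond : ¬ (max lo0 n0 ≤ U ∧ max lo0 n0 < t + 1) := by
            intro ⟨hle, _⟩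
            apply hBc
            apply (hP n0).mpr
            exact ⟨le_rfl, by omega⟩
          rw [if_neg hAcond, if_neg hBc]
      · -- b ≤ -2 : A's loop never fires, and B's candidate check fails
        have hbneg : b ≤ -2 := by omega
        have he : (0:Int) < -(b + 1) := by omega
        have hd : (0:Int) < -b := by omega
        -- feasibility interval for negative b
        have hP : ∀ n : Int, (0 ≤ t - n * b ∧ t - n * b ≤ n ∧ 0 ≤ n - (t - n * b)) ↔
            ((-(PySem.Int.floordiv t (-b))) ≤ n ∧ n ≤ PySem.Int.floordiv (-t) (-(b+1))) := by
          intro n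
          constructor
          · intro ⟨ha, hb', _⟩
            constructor
            · have h' : -n ≤ PySem.Int.floordiv t (-b) :=
                (PySem.Int.le_floordiv_iff_mul_le hd).mpr (by nlinarith)
              omega
            · exact (PySem.Int.le_floordiv_iff_mul_le he).mpr (by nlinarith)
          · intro ⟨hl, hr⟩
            have ha : (-n) * (-b) ≤ t := (PySem.Int.le_floordiv_iff_mul_le hd).mp (by omega)
            have hb' : n * (-(b+1)) ≤ -t := (PySem.Int.le_floordiv_iff_mul_le he).mp hr
            refine ⟨by nlinarith, by nlinarith, by nlinarith⟩
        have hloop := repLoopA_range t b _ _ hP (t + 1) lo0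
        rw [hloop]
        -- A's loop condition is contradictory
        set L' := -(PySem.Int.floordiv t (-b)) with hL'
        set U' := PySem.Int.floordiv (-t) (-(b+1)) with hU'
        have hAcond : ¬ (max lo0 L' ≤ U' ∧ max lo0 L' < t + 1) := by
          intro ⟨hle, hlt⟩
          set m := max lo0 L' with hm
          have hm1 : 1 ≤ m := by rw [hm, hlo0]; omega
          have hfeas := (hP m).mpr ⟨by omega, hle⟩
          obtain ⟨hx0, hxm, _⟩ := hfeas
          -- t ≤ m*(b+1) ≤ -m ≤ -1, but m ≤ t
          nlinarith
        rw [if_neg hAcond]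
        -- B's check fails: x ≤ n0 would mean t ≤ n0*(b+1), but floordiv bracket is strict (no divisibility)
        have hBc : ¬ (0 ≤ t - n0 * b ∧ t - n0 * b ≤ n0 ∧ 0 ≤ n0 - (t - n0 * b)) := by
          intro ⟨_, hxn, _⟩
          have hfd : PySem.Int.floordiv (-t) (b + 1) = PySem.Int.floordiv t (-(b+1)) := by
            have := PySem.Int.floordiv_neg_neg (-t) (b + 1)
            simpa using this.symm
          have hbr : PySem.Int.floordiv t (-(b+1)) * (-(b+1)) ≤ t :=
            (PySem.Int.le_floordiv_iff_mul_le he).mp le_rfl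
          have hne : PySem.Int.floordiv t (-(b+1)) * (-(b+1)) ≠ t := by
            intro heq
            apply h2
            rw [PySem.Int.mod_eq_zero_iff_dvd]
            exact ⟨-(PySem.Int.floordiv t (-(b+1))), by linarith [heq]⟩
          have hstrict : PySem.Int.floordiv t (-(b+1)) * (-(b+1)) < t := lt_of_le_of_ne hbr hne
          -- hxn : t - n0*b ≤ n0, i.e. t ≤ n0*(b+1) = fdiv t (-(b+1)) * (-(b+1))
          rw [hn0, hfd] at hxn
          nlinarith
        rw [if_neg hBc]
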